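-- pv_equiv track=rewrite | github.com/Yvonne20/demo | src/arrange_com.py | get_repeat_ls
-- ===== SOURCE A (Python) =====
-- def get_repeat_ls(cargo_ls):
--     used = set()
--     ls = []
--     for item in cargo_ls:
--         cargo = item[0]
--         cargo_group = item[1]
--         vol = item[2]
--         if cargo and cargo not in used:
--             ls.append((True, cargo, cargo_group, vol))
--             used.add(cargo)
--         else:
--             ls.append((False, cargo, cargo_group, vol))
--     return ls
-- ===== SOURCE B (Python) =====
-- def get_repeat_ls(cargo_ls):
--     # Two-stage approach: (1) build an index table recording, for each truthy
--     # cargo, the position of its first occurrence; (2) emit the rows, marking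
--     # True exactly when the row's position IS that first-occurrence index.
--     first_index = {}
--     for i, item in enumerate(cargo_ls):
--         if item[0]:
--             first_index.setdefault(item[0], i)
--     return [(bool(item[0]) and first_index.get(item[0]) == i,
--              item[0], item[1], item[2])
--             for i, item in enumerate(cargo_ls)]
-- ===== Notes on version B (the rewrite author's own statement) =====
-- stated objective: alternative
-- what changed: Replaces A's single stateful pass (a growing 'used' set consulted while emitting) by two staged passes: one pass builds a first-occurrence index table via setdefault, then a separate emission pass marks each row True iff its position equals the recorded first index.
import Mathlib
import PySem

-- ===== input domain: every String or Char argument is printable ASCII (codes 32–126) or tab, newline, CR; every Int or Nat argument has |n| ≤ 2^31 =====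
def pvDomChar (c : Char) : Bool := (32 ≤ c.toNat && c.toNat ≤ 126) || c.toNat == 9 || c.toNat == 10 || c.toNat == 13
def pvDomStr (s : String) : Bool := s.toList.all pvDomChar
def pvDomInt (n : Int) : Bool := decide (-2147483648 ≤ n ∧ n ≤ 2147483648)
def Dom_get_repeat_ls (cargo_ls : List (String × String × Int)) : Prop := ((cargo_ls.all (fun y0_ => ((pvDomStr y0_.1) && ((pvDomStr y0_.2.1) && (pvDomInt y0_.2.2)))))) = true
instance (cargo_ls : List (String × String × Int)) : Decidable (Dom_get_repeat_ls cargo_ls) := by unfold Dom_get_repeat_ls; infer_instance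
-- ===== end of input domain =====

-- B replaces A's single stateful pass (a 'used' set consulted while emitting) by two
-- staged passes: build a first-occurrence index table, then emit marking each row by
-- an index comparison. Same return value; neither version has side effects.

-- ===== PORT A =====
-- loop body of A: state = (used, ls)
def aStep (st : PySem.Set String × List (Bool × String × String × Int))
    (item : String × String × Int) : PySem.Set String × List (Bool × String × String × Int) :=
  let cargo := item.1
  let cargo_group := item.2.1
  let vol := item.2.2
  if cargo ≠ "" ∧ ¬ PySem.Set.contains st.1 cargo = true then
    (PySem.Set.add st.1 cargo, st.2 ++ [(true, cargo, cargo_group, vol)])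
  else
    (st.1, st.2 ++ [(false, cargo, cargo_group, vol)])

def get_repeat_ls (cargo_ls : List (String × String × Int)) : List (Bool × String × String × Int) :=
  (cargo_ls.foldl aStep (PySem.Set.empty, [])).2

-- ===== PORT B =====
-- pass 1 of B: first_index[cargo] = earliest index, via setdefault on truthy cargos
def bFirst (cargo_ls : List (String × String × Int)) : PySem.Dict String Int :=
  (PySem.List.enumerate cargo_ls 0).foldl
    (fun d p => if p.2.1 ≠ "" then d.setdefault p.2.1 p.1 else d) PySem.Dict.empty

-- pass 2 of B: emit one row; True iff the cargo is truthy and this is its first index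
def bEmit (fi : PySem.Dict String Int) (p : Int × (String × String × Int)) :
    Bool × String × String × Int :=
  (decide (p.2.1 ≠ "" ∧ fi.get? p.2.1 = some p.1), p.2.1, p.2.2.1, p.2.2.2)

def get_repeat_ls_alt (cargo_ls : List (String × String × Int)) : List (Bool × String × String × Int) :=
  (PySem.List.enumerate cargo_ls 0).map (bEmit (bFirst cargo_ls))

-- ===== PRECONDITION & SPEC =====
def Spec_get_repeat_ls (cargo_ls : List (String × String × Int)) (out : List (Bool × String × String × Int)) : Prop := out = get_repeat_ls_alt cargo_ls
instance (cargo_ls : List (String × String × Int)) (out : List (Bool × String × String × Int)) : Decidable (Spec_get_repeat_ls cargo_ls out) := by unfold Spec_get_repeat_ls; infer_instance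

-- ===== CLAIM (what is proved, stated in full; the proofs are below) =====
def Claim_equal_get_repeat_ls : Prop := ∀ (cargo_ls : List (String × String × Int)), Dom_get_repeat_ls cargo_ls → Spec_get_repeat_ls cargo_ls (get_repeat_ls cargo_ls)

-- ===== LEMMAS AND PROOFS =====

-- proof-only characterisation of B's first pass: the earliest index (from s) of a
-- truthy occurrence of cargo c in the list
def firstIdx : List (String × String × Int) → Int → String → Option Int
  | [], _, _ => none
  | it :: rest, s, c => if it.1 = c ∧ c ≠ "" then some s else firstIdx rest (s + 1) c

lemma firstIdx_append (xs ys : List (String × String × Int)) (s : Int) (c : String) :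
    firstIdx (xs ++ ys) s c = (firstIdx xs s c).or (firstIdx ys (s + xs.length) c) := by
  induction xs generalizing s with
  | nil => simp [firstIdx]
  | cons it rest ih =>
    by_cases h : it.1 = c ∧ c ≠ ""
    · simp [firstIdx, h]
    · simp only [List.cons_append, firstIdx, if_neg h, ih, List.length_cons]
      congr 2
      push_cast
      ring

lemma firstIdx_eq_none_iff (xs : List (String × String × Int)) (s : Int) (c : String)
    (hc : c ≠ "") : firstIdx xs s c = none ↔ c ∉ xs.map (·.1) := by
  induction xs generalizing s with
  | nil => simp [firstIdx]
  | cons it rest ih =>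
    by_cases h : it.1 = c
    · simp [firstIdx, h, hc]
    · have h2 : ¬ c = it.1 := fun hx => h hx.symm
      have h3 : ¬ (it.1 = c ∧ c ≠ "") := fun hx => h hx.1
      simp only [firstIdx, if_neg h3, ih, List.map_cons, List.mem_cons, not_or]
      simp [h2]

lemma firstIdx_lt (xs : List (String × String × Int)) (s : Int) (c : String) (v : Int)
    (h : firstIdx xs s c = some v) : v < s + xs.length := by
  induction xs generalizing s with
  | nil => simp [firstIdx] at h
  | cons it rest ih =>
    simp only [firstIdx] at h
    split_ifs at h with hh
    · cases h
      simp only [List.length_cons]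
      push_cast
      omega
    · have := ih (s + 1) h
      simp only [List.length_cons]
      push_cast
      push_cast at this
      omega

-- B's first pass computes firstIdx on top of the starting dict
lemma get?_bFold (l : List (String × String × Int)) :
    ∀ (s : Int) (d : PySem.Dict String Int) (c : String),
      ((PySem.List.enumerate l s).foldl
          (fun d p => if p.2.1 ≠ "" then d.setdefault p.2.1 p.1 else d) d).get? c
        = (d.get? c).or (firstIdx l s c) := by
  induction l with
  | nil => intro s d c; simp [PySem.List.enumerate_nil, firstIdx]
  | cons it rest ih =>
    intro s d c
    rw [PySem.List.enumerate_cons, List.foldl_cons, ih]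
    simp only []
    by_cases hhit : it.1 = c ∧ c ≠ ""
    · have h1 : it.1 ≠ "" := by rw [hhit.1]; exact hhit.2
      rw [if_pos h1, hhit.1, PySem.Dict.get?_setdefault_self]
      simp only [firstIdx, if_pos hhit]
      cases d.get? c <;> simp
    · have hstep : (if it.1 ≠ "" then d.setdefault it.1 s else d).get? c = d.get? c := by
        by_cases h1 : it.1 ≠ ""
        · rw [if_pos h1, PySem.Dict.get?_setdefault_of_ne]
          intro he
          exact hhit ⟨he.symm, he ▸ h1⟩
        · rw [if_neg h1]
      rw [hstep]
      simp only [firstIdx, if_neg hhit]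

-- head computation: B's mark at position |pref| is the prefix-membership test
lemma bEmit_head (pref rest : List (String × String × Int)) (it : String × String × Int) :
    bEmit (bFirst (pref ++ it :: rest)) ((pref.length : Int), it)
      = (decide (it.1 ≠ "" ∧ it.1 ∉ pref.map (·.1)), it.1, it.2.1, it.2.2) := by
  simp only [bEmit]
  congr 1
  by_cases hc : it.1 = ""
  · simp [hc]
  · have hget : (bFirst (pref ++ it :: rest)).get? it.1
        = (firstIdx pref 0 it.1).or (some (pref.length : Int)) := by
      rw [bFirst, get?_bFold, PySem.Dict.get?_empty, Option.none_or, firstIdx_append]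
      simp [firstIdx, hc]
    rw [hget]
    rcases hfi : firstIdx pref 0 it.1 with _ | v
    · have : it.1 ∉ pref.map (·.1) := (firstIdx_eq_none_iff pref 0 it.1 hc).mp hfi
      simp [hc, this]
    · have hv : v < (pref.length : Int) := by
        have := firstIdx_lt pref 0 it.1 v hfi; omega
      have hmem : it.1 ∈ pref.map (·.1) := by
        by_contra hmem
        rw [(firstIdx_eq_none_iff pref 0 it.1 hc).mpr hmem] at hfi
        cases hfi
      simp only [Option.some_or]
      have : ¬ (some v = some (pref.length : Int)) := by
        intro h; cases h; omega
      simp [hc, hmem, this]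

-- Invariant: with 'pref' already processed, A's 'used' contains exactly the truthy
-- cargos of 'pref', and the rest of A's loop emits what B's emission pass emits.
lemma fold_eq (full : List (String × String × Int)) :
    ∀ (l pref : List (String × String × Int)) (u : PySem.Set String)
      (acc : List (Bool × String × String × Int)),
      full = pref ++ l →
      (∀ c : String, c ≠ "" → (c ∈ u ↔ c ∈ pref.map (·.1))) →
      (List.foldl aStep (u, acc) l).2
        = acc ++ (PySem.List.enumerate l (pref.length : Int)).map (bEmit (bFirst full)) := by
  intro l
  induction l with
  | nil =>
    intro pref u acc _ _
    simp [PySem.List.enumerate_nil]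
  | cons it rest ih =>
    intro pref u acc hfull hinv
    have hhead : bEmit (bFirst full) ((pref.length : Int), it)
        = (decide (it.1 ≠ "" ∧ it.1 ∉ pref.map (·.1)), it.1, it.2.1, it.2.2) := by
      rw [hfull]; exact bEmit_head pref rest it
    have hfull' : full = (pref ++ [it]) ++ rest := by simp [hfull]
    rw [PySem.List.enumerate_cons, List.map_cons, hhead]
    by_cases hnew : it.1 ≠ "" ∧ it.1 ∉ pref.map (·.1)
    · have hu : it.1 ∉ u := fun h => hnew.2 ((hinv it.1 hnew.1).mp h)
      have hstep : List.foldl aStep (u, acc) (it :: rest)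
          = List.foldl aStep (PySem.Set.add u it.1, acc ++ [(true, it.1, it.2.1, it.2.2)]) rest := by
        rw [List.foldl_cons]
        simp [aStep, hnew.1, hu]
      have hinv' : ∀ c : String, c ≠ "" →
          (c ∈ PySem.Set.add u it.1 ↔ c ∈ (pref ++ [it]).map (·.1)) := by
        intro c hc
        rw [PySem.Set.mem_add]
        simp [hinv c hc]
      rw [hstep, ih (pref ++ [it]) _ _ hfull' hinv']
      simp [hnew, List.append_assoc]
    · have hu : ¬ (it.1 ≠ "" ∧ it.1 ∉ u) := by
        intro h
        exact hnew ⟨h.1, fun hm => h.2 ((hinv it.1 h.1).mpr hm)⟩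
      have hstep : List.foldl aStep (u, acc) (it :: rest)
          = List.foldl aStep (u, acc ++ [(false, it.1, it.2.1, it.2.2)]) rest := by
        rw [List.foldl_cons]
        have : ¬ (it.1 ≠ "" ∧ ¬ PySem.Set.contains u it.1 = true) := by
          simpa [PySem.Set.contains_iff] using hu
        simp only [aStep]
        rw [if_neg this]
      have hinv' : ∀ c : String, c ≠ "" →
          (c ∈ u ↔ c ∈ (pref ++ [it]).map (·.1)) := by
        intro c hc
        rw [hinv c hc]
        simp only [List.map_append, List.map_cons, List.map_nil, List.mem_append,
          List.mem_cons, List.not_mem_nil, or_false]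
        constructor
        · exact Or.inl
        · rintro (h | h)
          · exact h
          · subst h
            rcases not_and_or.mp hnew with h1 | h1
            · exact absurd hc (by simpa using h1)
            · exact not_not.mp h1
      rw [hstep, ih (pref ++ [it]) _ _ hfull' hinv']
      have hm : decide (it.1 ≠ "" ∧ it.1 ∉ pref.map (·.1)) = false := by
        simpa using hnew
      simp [hm, List.append_assoc]

-- ===== VERDICT (by name: the statement is the Claim_ definition above) =====
theorem get_repeat_ls_spec : Claim_equal_get_repeat_ls := by
  intro cargo_ls _
  show get_repeat_ls cargo_ls = get_repeat_ls_alt cargo_ls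
  unfold get_repeat_ls get_repeat_ls_alt
  have := fold_eq cargo_ls cargo_ls [] PySem.Set.empty [] (by simp) (by
    intro c hc
    simp [PySem.Set.empty])
  simpa using this
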